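-- pv_equiv track=rewrite | github.com/DnajaAraujo/ifpi-ads-algoritmos2020 | Exercicios_Cap09/e7_palavras_com_3_letras_duplas.py | verifica_tres_letras_duplas
-- ===== SOURCE A (Python) =====
-- def verifica_tres_letras_duplas(palavra):
--     i = 0
--     contador = 0
--
--     while i < len(palavra) - 1:
--         if palavra[i] == palavra[i+1]:
--             contador += 1
--             if contador == 3:
--                 return True
--             i += 2
--         else:
--             i = i + 1 - (2 * contador)
--             contador = 0
--     return False
-- ===== SOURCE B (Python) =====
-- def verifica_tres_letras_duplas(palavra):
--     for i in range(len(palavra) - 5):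
--         if (palavra[i] == palavra[i+1]
--                 and palavra[i+2] == palavra[i+3]
--                 and palavra[i+4] == palavra[i+5]):
--             return True
--     return False
-- ===== Notes on version B (the rewrite author's own statement) =====
-- stated objective: simpler
-- what changed: Replaces the stateful greedy counter with index rewinding by a stateless fixed-window scan that independently tests each 6-character window for three consecutive doubled letters.
import Mathlib
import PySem

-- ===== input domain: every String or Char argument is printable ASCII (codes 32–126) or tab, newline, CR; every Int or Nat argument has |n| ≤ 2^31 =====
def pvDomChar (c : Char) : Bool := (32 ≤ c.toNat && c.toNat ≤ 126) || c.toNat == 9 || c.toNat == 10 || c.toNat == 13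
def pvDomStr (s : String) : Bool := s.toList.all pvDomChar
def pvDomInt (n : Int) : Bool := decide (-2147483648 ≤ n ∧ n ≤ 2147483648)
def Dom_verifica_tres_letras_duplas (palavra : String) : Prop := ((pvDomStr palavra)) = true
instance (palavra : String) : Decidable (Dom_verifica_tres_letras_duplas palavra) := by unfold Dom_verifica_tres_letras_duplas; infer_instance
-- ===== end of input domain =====

-- B replaces A's stateful greedy counter with index rewinding by a stateless
-- fixed-window scan testing each 6-character window independently (objective: simpler).

-- ===== PORT A =====
-- A's while-loop with state (i, contador); the proof arguments hc/h2 record the loop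
-- invariants contador ≤ 2 and 2*contador ≤ i (always true in A's execution) so that
-- the Nat subtraction i+1-2*c is exact (Python's i never goes negative) and the loop terminates.
def pvLoopA (l : List Char) (i c : Nat) (hc : c ≤ 2) (h2 : 2 * c ≤ i) : Bool :=
  if h : i + 1 < l.length then
    if l[i]! = l[i+1]! then
      if h3 : c + 1 = 3 then true
      else pvLoopA l (i + 2) (c + 1) (by omega) (by omega)
    else pvLoopA l (i + 1 - 2 * c) 0 (by omega) (by omega)
  else false
termination_by 3 * (l.length - i) + 5 * c
decreasing_by all_goals omega

def verifica_tres_letras_duplas (palavra : String) : Bool :=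
  pvLoopA palavra.toList 0 0 (by omega) (by omega)

-- ===== PORT B =====
-- B's for-loop over range(len-5): i runs while i+5 < len, each window tested independently.
def pvLoopB (l : List Char) (i : Nat) : Bool :=
  if h : i + 5 < l.length then
    if l[i]! = l[i+1]! ∧ l[i+2]! = l[i+3]! ∧ l[i+4]! = l[i+5]! then true
    else pvLoopB l (i + 1)
  else false
termination_by l.length - i
decreasing_by omega

def verifica_tres_letras_duplas_alt (palavra : String) : Bool :=
  pvLoopB palavra.toList 0

-- ===== PRECONDITION & SPEC =====
def Spec_verifica_tres_letras_duplas (palavra : String) (out : Bool) : Prop := out = verifica_tres_letras_duplas_alt palavra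
instance (palavra : String) (out : Bool) : Decidable (Spec_verifica_tres_letras_duplas palavra out) := by unfold Spec_verifica_tres_letras_duplas; infer_instance

-- ===== CLAIM (what is proved, stated in full; the proofs are below) =====
def Claim_equal_verifica_tres_letras_duplas : Prop := ∀ (palavra : String), Dom_verifica_tres_letras_duplas palavra → Spec_verifica_tres_letras_duplas palavra (verifica_tres_letras_duplas palavra)

-- ===== LEMMAS AND PROOFS =====

-- "a window of three consecutive doubled letters starts at j"
def pvW (l : List Char) (j : Nat) : Prop :=
  j + 5 < l.length ∧ l[j]! = l[j+1]! ∧ l[j+2]! = l[j+3]! ∧ l[j+4]! = l[j+5]!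

theorem pvLoopA_iff (l : List Char) (i c : Nat) (hc : c ≤ 2) (h2 : 2 * c ≤ i)
    (s : Nat) (hs : i = s + 2 * c)
    (hm : ∀ k, k < c → l[s + 2 * k]! = l[s + 2 * k + 1]!) :
    pvLoopA l i c hc h2 = true ↔ ∃ j, s ≤ j ∧ pvW l j := by
  fun_induction pvLoopA l i c hc h2 generalizing s with
  | case1 i c hc h2 h heq h3 =>
    -- contador reached 3: window at s
    simp only [true_iff]
    refine ⟨s, le_refl s, ?_, ?_, ?_, ?_⟩
    · omega
    · have := hm 0 (by omega); simpa using this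
    · have := hm 1 (by omega); simpa using this
    · have h4 : i = s + 4 := by omega
      rw [h4] at heq
      simpa using heq
  | case2 i c hc h2 h heq h3 ih =>
    rw [ih s (by omega) ?_]
    intro k hk
    rcases Nat.lt_or_ge k c with hk' | hk'
    · exact hm k hk'
    · have hkc : k = c := by omega
      subst hkc
      have : i = s + 2 * k := by omega
      rw [this] at heq; exact heq
  | case3 i c hc h2 h hne ih =>
    rw [ih (s + 1) (by omega) (by intro k hk; omega)]
    constructor
    · rintro ⟨j, hj, hW⟩; exact ⟨j, by omega, hW⟩
    · rintro ⟨j, hj, hW⟩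
      rcases Nat.lt_or_ge s j with hlt | hge
      · exact ⟨j, by omega, hW⟩
      · -- j = s: the window's pair number c matches, contradicting the mismatch at i = s + 2c
        have hjs : j = s := by omega
        subst hjs
        exfalso
        obtain ⟨h5, p0, p1, p2⟩ := hW
        interval_cases c
        · exact hne (by simpa [hs] using p0)
        · exact hne (by rw [show i = j + 2 by omega]; simpa using p1)
        · exact hne (by rw [show i = j + 4 by omega]; simpa using p2)
  | case4 i c hc h2 h =>
    refine iff_of_false (by simp) ?_
    rintro ⟨j, hj, h5, -⟩
    omega

theorem pvLoopB_iff (l : List Char) (i : Nat) :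
    pvLoopB l i = true ↔ ∃ j, i ≤ j ∧ pvW l j := by
  fun_induction pvLoopB l i with
  | case1 i h heq =>
    simp only [true_iff]
    exact ⟨i, le_refl i, h, heq⟩
  | case2 i h hne ih =>
    rw [ih]
    constructor
    · rintro ⟨j, hj, hW⟩; exact ⟨j, by omega, hW⟩
    · rintro ⟨j, hj, hW⟩
      rcases Nat.lt_or_ge i j with hlt | hge
      · exact ⟨j, by omega, hW⟩
      · have : j = i := by omega
        subst this
        exact absurd hW.2 hne
  | case3 i h =>
    refine iff_of_false (by simp) ?_
    rintro ⟨j, hj, h5, -⟩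
    omega

-- ===== VERDICT (by name: the statement is the Claim_ definition above) =====
theorem verifica_tres_letras_duplas_spec : Claim_equal_verifica_tres_letras_duplas := by
  intro palavra _
  unfold Spec_verifica_tres_letras_duplas verifica_tres_letras_duplas verifica_tres_letras_duplas_alt
  rw [Bool.eq_iff_iff]
  rw [pvLoopA_iff palavra.toList 0 0 (by omega) (by omega) 0 (by omega) (by intro k hk; omega)]
  rw [pvLoopB_iff palavra.toList 0]
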